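-- pv_equiv track=rewrite | github.com/TheWordOfDan/ccsf_cs_131B | lab_6.py | rSearch
-- ===== SOURCE A (Python) =====
-- def rSearch(searchSpace_, searchFor_, include_):
-- 	if len(searchFor_) == 0:
-- 		return searchSpace_
-- 	ch = searchFor_.pop()
--
-- 	results = []
-- 	for word in searchSpace_:
-- 		found = False
-- 		if ch in word:
-- 			found = True
-- 		if found and include_:
-- 			# Found a required letter
-- 			results.append(word)
-- 		if found and not include_:
-- 			# Found a forbidden letter
-- 			continue
-- 		if not found and include_:
-- 			# Didn't find a required letter
-- 			continue
-- 		if not found and not include_: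
-- 			# Didn't find a forbidden letter
-- 			results.append(word)
--
--
-- 	return rSearch(results, searchFor_, include_)
-- ===== SOURCE B (Python) =====
-- def rSearch(searchSpace_, searchFor_, include_):
-- 	words = searchSpace_
-- 	while searchFor_:
-- 		ch = searchFor_.pop()
-- 		if include_:
-- 			words = [w for w in words if ch in w]
-- 		else:
-- 			words = [w for w in words if ch not in w]
-- 	return words
-- ===== Notes on version B (the rewrite author's own statement) =====
-- stated objective: simpler
-- what changed: Replaced A's recursion with explicit branch bookkeeping by an iterative while-pop loop that re-filters the word list with a single comprehension per letter.
import Mathlib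
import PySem

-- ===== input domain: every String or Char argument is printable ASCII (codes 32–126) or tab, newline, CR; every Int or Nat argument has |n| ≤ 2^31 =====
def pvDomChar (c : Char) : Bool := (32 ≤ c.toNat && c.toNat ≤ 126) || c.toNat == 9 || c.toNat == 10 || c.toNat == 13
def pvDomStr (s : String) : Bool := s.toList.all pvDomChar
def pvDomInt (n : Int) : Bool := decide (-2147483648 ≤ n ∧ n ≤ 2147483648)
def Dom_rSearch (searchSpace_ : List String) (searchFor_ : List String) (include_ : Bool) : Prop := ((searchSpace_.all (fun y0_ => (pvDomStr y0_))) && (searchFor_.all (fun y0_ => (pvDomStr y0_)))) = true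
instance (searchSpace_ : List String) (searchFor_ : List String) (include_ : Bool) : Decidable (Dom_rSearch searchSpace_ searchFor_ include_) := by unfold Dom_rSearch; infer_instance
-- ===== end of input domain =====

-- B replaces A's recursion-with-branch-bookkeeping by an iterative while-pop loop filtering with one
-- comprehension per letter (same cost). Both A and B empty searchFor_ in place; equivalence is about the return value.


-- ===== PORT A =====
-- the body of A's for-loop: found flag, then the four if-branches in A's order
def rSearchStep (ch : String) (include_ : Bool) (results : List String) (word : String) : List String :=
  let found := PySem.Str.isIn ch word
  if found && include_ then results ++ [word]
  else if found && !include_ then results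
  else if !found && include_ then results
  else results ++ [word]

def rSearch (searchSpace_ : List String) (searchFor_ : List String) (include_ : Bool) : List String :=
  match h : searchFor_.getLast? with
  | none => searchSpace_
  | some ch => rSearch (searchSpace_.foldl (rSearchStep ch include_) []) searchFor_.dropLast include_
termination_by searchFor_.length
decreasing_by
  cases searchFor_ with
  | nil => simp at h
  | cons a l => simp [List.length_dropLast]

-- ===== PORT B =====
def rSearch_alt (searchSpace_ : List String) (searchFor_ : List String) (include_ : Bool) : List String :=
  searchFor_.reverse.foldl
    (fun words ch =>
      if include_ then words.filter (fun w => PySem.Str.isIn ch w)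
      else words.filter (fun w => !PySem.Str.isIn ch w))
    searchSpace_

-- ===== PRECONDITION & SPEC =====
def Spec_rSearch (searchSpace_ : List String) (searchFor_ : List String) (include_ : Bool) (out : List String) : Prop := out = rSearch_alt searchSpace_ searchFor_ include_
instance (searchSpace_ : List String) (searchFor_ : List String) (include_ : Bool) (out : List String) : Decidable (Spec_rSearch searchSpace_ searchFor_ include_ out) := by unfold Spec_rSearch; infer_instance

-- ===== CLAIM (what is proved, stated in full; the proofs are below) =====
def Claim_equal_rSearch : Prop := ∀ (searchSpace_ : List String) (searchFor_ : List String) (include_ : Bool), Dom_rSearch searchSpace_ searchFor_ include_ → Spec_rSearch searchSpace_ searchFor_ include_ (rSearch searchSpace_ searchFor_ include_)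

-- ===== LEMMAS AND PROOFS =====
-- one pass of A's loop is a filter
theorem foldl_rSearchStep (ss : List String) (ch : String) (inc : Bool) (acc : List String) :
    ss.foldl (rSearchStep ch inc) acc
      = acc ++ (if inc then ss.filter (fun w => PySem.Str.isIn ch w)
                else ss.filter (fun w => !PySem.Str.isIn ch w)) := by
  induction ss generalizing acc with
  | nil => simp
  | cons w ss ih =>
    simp only [List.foldl_cons, ih, rSearchStep]
    cases h : PySem.Chars.isIn ch.toList w.toList <;> cases inc <;>
      simp [PySem.Str.isIn_eq, h]

theorem rSearch_eq_alt (sf ss : List String) (inc : Bool) :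
    rSearch ss sf inc = rSearch_alt ss sf inc := by
  induction sf using List.reverseRecOn generalizing ss with
  | nil => simp [rSearch, rSearch_alt]
  | append_singleton l ch ih =>
    rw [rSearch]
    split
    next h => simp at h
    next c h =>
      rw [List.getLast?_concat, Option.some.injEq] at h
      subst h
      simp only [List.dropLast_concat, ih, foldl_rSearchStep, List.nil_append,
        rSearch_alt, List.reverse_append, List.reverse_singleton,
        List.singleton_append, List.foldl_cons]

-- ===== VERDICT (by name: the statement is the Claim_ definition above) =====
theorem rSearch_spec : Claim_equal_rSearch := by
  intro ss sf inc _
  exact rSearch_eq_alt sf ss inc
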